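-- pv_equiv track=rewrite | github.com/gdtsitlauri/patv-x | src/patv_x_detector.py | _merge_sustained_flags
-- ===== SOURCE A (Python) =====
-- from typing import Optional
--
-- def _merge_sustained_flags(flags: list[bool], min_len: int = 2, gap: int = 1) -> list[tuple[int, int]]:
--     spans: list[tuple[int, int]] = []
--     start: Optional[int] = None
--     last_true = -10**9
--     for i, f in enumerate(flags):
--         if f:
--             if start is None:
--                 start = i
--             elif i - last_true > gap + 1:
--                 if last_true - start + 1 >= min_len:
--                     spans.append((start, last_true))
--                 start = i
--             last_true = i
--         elif start is not None and i - last_true > gap + 1: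
--             if last_true - start + 1 >= min_len:
--                 spans.append((start, last_true))
--             start = None
--     if start is not None and last_true - start + 1 >= min_len:
--         spans.append((start, last_true))
--     return spans
-- ===== SOURCE B (Python) =====
-- def _merge_sustained_flags(flags: list[bool], min_len: int = 2, gap: int = 1) -> list[tuple[int, int]]:
--     trues = [i for i, f in enumerate(flags) if f]
--     spans: list[tuple[int, int]] = []
--     if not trues:
--         return spans
--     start = prev = trues[0]
--     for t in trues[1:]:
--         if t - prev > gap + 1:
--             if prev - start + 1 >= min_len:
--                 spans.append((start, prev))
--             start = t
--         prev = t
--     if prev - start + 1 >= min_len: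
--         spans.append((start, prev))
--     return spans
-- ===== Notes on version B (the rewrite author's own statement) =====
-- stated objective: simpler
-- what changed: B first collects the list of True indices, then groups consecutive indices whose difference is at most gap+1 and keeps groups of span length >= min_len, replacing A's single interleaved sweep that carries an Optional start / last_true state and closes spans in both the True and False branches and in a final flush.
import Mathlib
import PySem

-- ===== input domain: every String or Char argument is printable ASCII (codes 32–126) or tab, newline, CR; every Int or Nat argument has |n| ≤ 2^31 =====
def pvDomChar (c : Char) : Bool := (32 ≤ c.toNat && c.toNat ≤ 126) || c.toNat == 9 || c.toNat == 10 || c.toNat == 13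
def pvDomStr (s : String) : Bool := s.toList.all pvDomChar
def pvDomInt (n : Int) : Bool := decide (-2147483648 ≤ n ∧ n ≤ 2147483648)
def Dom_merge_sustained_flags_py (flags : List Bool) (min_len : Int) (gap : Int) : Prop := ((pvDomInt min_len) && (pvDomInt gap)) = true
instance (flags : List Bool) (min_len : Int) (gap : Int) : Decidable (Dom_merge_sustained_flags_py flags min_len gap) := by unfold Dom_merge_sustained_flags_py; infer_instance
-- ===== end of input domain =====

-- B separates the work into two phases (collect True indices, then group them by gap and
-- filter by min_len) instead of A's single interleaved sweep; objective: simpler, same cost.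

-- ===== PORT A =====
-- literal transliteration of A's single sweep: state (spans, start : Option Int, last_true)
def merge_sustained_flags_py (flags : List Bool) (min_len : Int) (gap : Int) : List (Int × Int) :=
  let st := (PySem.List.enumerate flags).foldl
    (fun (acc : List (Int × Int) × Option Int × Int) (p : Int × Bool) =>
      let spans := acc.1
      let start := acc.2.1
      let last_true := acc.2.2
      let i := p.1
      if p.2 then
        match start with
        | none => (spans, some i, i)
        | some s =>
          if i - last_true > gap + 1 then
            ((if last_true - s + 1 ≥ min_len then spans ++ [(s, last_true)] else spans), some i, i)
          else (spans, some s, i)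
      else
        match start with
        | some s =>
          if i - last_true > gap + 1 then
            ((if last_true - s + 1 ≥ min_len then spans ++ [(s, last_true)] else spans), none, last_true)
          else acc
        | none => acc)
    ([], none, -(10 : Int) ^ 9)
  match st.2.1 with
  | some s => if st.2.2 - s + 1 ≥ min_len then st.1 ++ [(s, st.2.2)] else st.1
  | none => st.1

-- ===== PORT B =====
-- literal transliteration of Source B: trues list first, then a grouping loop with state (spans, start, prev)
def merge_sustained_flags_py_alt (flags : List Bool) (min_len : Int) (gap : Int) : List (Int × Int) :=
  let trues := ((PySem.List.enumerate flags).filter (fun p => p.2)).map (fun p => p.1)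
  match trues with
  | [] => []
  | t0 :: rest =>
    let st := rest.foldl
      (fun (acc : List (Int × Int) × Int × Int) (t : Int) =>
        let spans := acc.1
        let start := acc.2.1
        let prev := acc.2.2
        if t - prev > gap + 1 then
          ((if prev - start + 1 ≥ min_len then spans ++ [(start, prev)] else spans), t, t)
        else (spans, start, t))
      ([], t0, t0)
    if st.2.2 - st.2.1 + 1 ≥ min_len then st.1 ++ [(st.2.1, st.2.2)] else st.1

-- ===== PRECONDITION & SPEC =====
def Spec_merge_sustained_flags_py (flags : List Bool) (min_len : Int) (gap : Int) (out : List (Int × Int)) : Prop := out = merge_sustained_flags_py_alt flags min_len gap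
instance (flags : List Bool) (min_len : Int) (gap : Int) (out : List (Int × Int)) : Decidable (Spec_merge_sustained_flags_py flags min_len gap out) := by unfold Spec_merge_sustained_flags_py; infer_instance

-- ===== CLAIM (what is proved, stated in full; the proofs are below) =====
def Claim_equal_merge_sustained_flags_py : Prop := ∀ (flags : List Bool) (min_len : Int) (gap : Int), Dom_merge_sustained_flags_py flags min_len gap → Spec_merge_sustained_flags_py flags min_len gap (merge_sustained_flags_py flags min_len gap)

-- ===== LEMMAS AND PROOFS =====

-- A's loop body, named (definitionally equal to the lambda in the port of A)
def pvStepA (min_len gap : Int) (acc : List (Int × Int) × Option Int × Int) (p : Int × Bool) :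
    List (Int × Int) × Option Int × Int :=
  let spans := acc.1
  let start := acc.2.1
  let last_true := acc.2.2
  let i := p.1
  if p.2 then
    match start with
    | none => (spans, some i, i)
    | some s =>
      if i - last_true > gap + 1 then
        ((if last_true - s + 1 ≥ min_len then spans ++ [(s, last_true)] else spans), some i, i)
      else (spans, some s, i)
  else
    match start with
    | some s =>
      if i - last_true > gap + 1 then
        ((if last_true - s + 1 ≥ min_len then spans ++ [(s, last_true)] else spans), none, last_true)
      else acc
    | none => acc

-- B's loop body, named (definitionally equal to the lambda in the port of B)
def pvStepB (min_len gap : Int) (acc : List (Int × Int) × Int × Int) (t : Int) :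
    List (Int × Int) × Int × Int :=
  let spans := acc.1
  let start := acc.2.1
  let prev := acc.2.2
  if t - prev > gap + 1 then
    ((if prev - start + 1 ≥ min_len then spans ++ [(start, prev)] else spans), t, t)
  else (spans, start, t)

-- list of indices of True flags, counting from i (proof-side characterisation of B's `trues`)
def pvTrues (i : Int) : List Bool → List Int
  | [] => []
  | f :: r => if f then i :: pvTrues (i + 1) r else pvTrues (i + 1) r

-- grouping of a list of true indices, current group started at s with last element prev
def pvGrp (min_len gap s prev : Int) : List Int → List (Int × Int)
  | [] => if prev - s + 1 ≥ min_len then [(s, prev)] else []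
  | t :: ts =>
    if t - prev > gap + 1 then
      (if prev - s + 1 ≥ min_len then [(s, prev)] else []) ++ pvGrp min_len gap t t ts
    else pvGrp min_len gap s t ts

-- A's sweep as structural recursion (loop body + final flush)
def pvRunA (min_len gap : Int) : List Bool → Int → List (Int × Int) → Option Int → Int → List (Int × Int)
  | [], _, spans, start, last_true =>
    match start with
    | some s => if last_true - s + 1 ≥ min_len then spans ++ [(s, last_true)] else spans
    | none => spans
  | f :: r, i, spans, start, last_true =>
    pvRunA min_len gap r (i + 1) (pvStepA min_len gap (spans, start, last_true) (i, f)).1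
      (pvStepA min_len gap (spans, start, last_true) (i, f)).2.1
      (pvStepA min_len gap (spans, start, last_true) (i, f)).2.2

lemma pvRunA_eq_foldA (min_len gap : Int) (flags : List Bool) :
    ∀ (i : Int) (spans : List (Int × Int)) (start : Option Int) (last_true : Int),
    (match (List.foldl (pvStepA min_len gap) (spans, start, last_true)
              (PySem.List.enumerate flags i)).2.1 with
     | some s =>
       if (List.foldl (pvStepA min_len gap) (spans, start, last_true)
              (PySem.List.enumerate flags i)).2.2 - s + 1 ≥ min_len then
         (List.foldl (pvStepA min_len gap) (spans, start, last_true)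
              (PySem.List.enumerate flags i)).1 ++
           [(s, (List.foldl (pvStepA min_len gap) (spans, start, last_true)
              (PySem.List.enumerate flags i)).2.2)]
       else (List.foldl (pvStepA min_len gap) (spans, start, last_true)
              (PySem.List.enumerate flags i)).1
     | none => (List.foldl (pvStepA min_len gap) (spans, start, last_true)
              (PySem.List.enumerate flags i)).1)
    = pvRunA min_len gap flags i spans start last_true := by
  induction flags with
  | nil => intro i spans start last_true; cases start <;> simp [PySem.List.enumerate_nil, pvRunA]
  | cons f r ih =>
    intro i spans start last_true
    simp only [PySem.List.enumerate_cons, List.foldl_cons, pvRunA]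
    rcases pvStepA min_len gap (spans, start, last_true) (i, f) with ⟨a, b, c⟩
    exact ih (i + 1) a b c

lemma pvGrp_eq_foldB (min_len gap : Int) (ts : List Int) :
    ∀ (spans : List (Int × Int)) (start prev : Int),
    (if (List.foldl (pvStepB min_len gap) (spans, start, prev) ts).2.2
        - (List.foldl (pvStepB min_len gap) (spans, start, prev) ts).2.1 + 1 ≥ min_len then
       (List.foldl (pvStepB min_len gap) (spans, start, prev) ts).1 ++
         [((List.foldl (pvStepB min_len gap) (spans, start, prev) ts).2.1,
           (List.foldl (pvStepB min_len gap) (spans, start, prev) ts).2.2)]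
     else (List.foldl (pvStepB min_len gap) (spans, start, prev) ts).1)
    = spans ++ pvGrp min_len gap start prev ts := by
  induction ts with
  | nil =>
    intro spans start prev
    simp only [List.foldl_nil, pvGrp]
    split_ifs <;> simp
  | cons t ts ih =>
    intro spans start prev
    simp only [List.foldl_cons]
    by_cases h : t - prev > gap + 1
    · have hstep : pvStepB min_len gap (spans, start, prev) t =
        ((if prev - start + 1 ≥ min_len then spans ++ [(start, prev)] else spans), t, t) := by
        simp [pvStepB, h]
      rw [hstep, ih]
      simp only [pvGrp, if_pos h]
      split_ifs <;> simp
    · have hstep : pvStepB min_len gap (spans, start, prev) t = (spans, start, t) := by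
        simp [pvStepB, h]
      rw [hstep, ih]
      simp [pvGrp, h]

lemma pvTrues_eq (flags : List Bool) : ∀ i : Int,
    ((PySem.List.enumerate flags i).filter (fun p => p.2)).map (fun p => p.1) = pvTrues i flags := by
  induction flags with
  | nil => intro i; simp [PySem.List.enumerate_nil, pvTrues]
  | cons f r ih =>
    intro i
    cases f <;> simp [PySem.List.enumerate_cons, pvTrues, ih]

lemma pvTrues_ge (flags : List Bool) : ∀ (i t : Int), t ∈ pvTrues i flags → i ≤ t := by
  induction flags with
  | nil => intro i t h; simp [pvTrues] at h
  | cons f r ih =>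
    intro i t h
    cases f <;> simp only [pvTrues, if_true, List.mem_cons] at h
    · have := ih (i + 1) t h; omega
    · rcases h with h | h
      · omega
      · have := ih (i + 1) t h; omega

-- the two sides agree, both for the inactive (start = none) and active (start = some s) state
lemma pvMain (min_len gap : Int) (flags : List Bool) :
    ∀ (i : Int) (spans : List (Int × Int)) (l : Int),
    (pvRunA min_len gap flags i spans none l
      = spans ++ (match pvTrues i flags with
                  | [] => []
                  | t :: ts => pvGrp min_len gap t t ts)) ∧
    (∀ s : Int, pvRunA min_len gap flags i spans (some s) l
      = spans ++ pvGrp min_len gap s l (pvTrues i flags)) := by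
  induction flags with
  | nil =>
    intro i spans l
    constructor
    · simp [pvRunA, pvTrues]
    · intro s
      simp only [pvRunA, pvTrues, pvGrp]
      split_ifs <;> simp
  | cons f r ih =>
    intro i spans l
    constructor
    · -- inactive state
      cases f
      · simpa [pvRunA, pvStepA, pvTrues] using (ih (i + 1) spans l).1
      · simpa [pvRunA, pvStepA, pvTrues] using (ih (i + 1) spans i).2 i
    · intro s
      cases f
      · -- a False flag
        by_cases h : i - l > gap + 1
        · -- close the group and go inactive
          have hin := (ih (i + 1) (if l - s + 1 ≥ min_len then spans ++ [(s, l)] else spans) l).1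
          have hstep : pvRunA min_len gap (false :: r) i spans (some s) l
              = pvRunA min_len gap r (i + 1)
                  (if l - s + 1 ≥ min_len then spans ++ [(s, l)] else spans) none l := by
            simp [pvRunA, pvStepA, h]
          rw [hstep, hin]
          simp only [pvTrues, Bool.false_eq_true, if_false]
          cases hts : pvTrues (i + 1) r with
          | nil =>
            simp only [pvGrp]
            split_ifs <;> simp
          | cons t ts =>
            have ht : i + 1 ≤ t := pvTrues_ge r (i + 1) t (by rw [hts]; exact List.mem_cons_self ..)
            have hbreak : t - l > gap + 1 := by omega
            simp only [pvGrp, if_pos hbreak]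
            split_ifs <;> simp
        · -- state unchanged
          have hstep : pvRunA min_len gap (false :: r) i spans (some s) l
              = pvRunA min_len gap r (i + 1) spans (some s) l := by
            simp [pvRunA, pvStepA, h]
          rw [hstep, (ih (i + 1) spans l).2 s]
          simp [pvTrues]
      · -- a True flag at index i
        by_cases h : i - l > gap + 1
        · have hstep : pvRunA min_len gap (true :: r) i spans (some s) l
              = pvRunA min_len gap r (i + 1)
                  (if l - s + 1 ≥ min_len then spans ++ [(s, l)] else spans) (some i) i := by
            simp [pvRunA, pvStepA, h]
          rw [hstep, (ih (i + 1) (if l - s + 1 ≥ min_len then spans ++ [(s, l)] else spans) i).2 i]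
          have htr : pvTrues i (true :: r) = i :: pvTrues (i + 1) r := by simp [pvTrues]
          have hg : pvGrp min_len gap s l (i :: pvTrues (i + 1) r)
              = (if l - s + 1 ≥ min_len then [(s, l)] else [])
                  ++ pvGrp min_len gap i i (pvTrues (i + 1) r) := by
            simp [pvGrp, h]
          rw [htr, hg]
          split_ifs <;> simp
        · have hstep : pvRunA min_len gap (true :: r) i spans (some s) l
              = pvRunA min_len gap r (i + 1) spans (some s) i := by
            simp [pvRunA, pvStepA, h]
          rw [hstep, (ih (i + 1) spans i).2 s]
          simp [pvTrues, pvGrp, h]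

-- the ports, rephrased through the proof-side recursions
lemma pvPortA_eq (flags : List Bool) (min_len gap : Int) :
    merge_sustained_flags_py flags min_len gap
      = pvRunA min_len gap flags 0 [] none (-(10 : Int) ^ 9) :=
  pvRunA_eq_foldA min_len gap flags 0 [] none (-(10 : Int) ^ 9)

lemma pvPortB_eq (flags : List Bool) (min_len gap : Int) :
    merge_sustained_flags_py_alt flags min_len gap
      = (match pvTrues 0 flags with
         | [] => []
         | t :: ts => [] ++ pvGrp min_len gap t t ts) := by
  rw [← pvTrues_eq flags 0]
  cases hts : ((PySem.List.enumerate flags 0).filter (fun p => p.2)).map (fun p => p.1) with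
  | nil =>
    unfold merge_sustained_flags_py_alt
    rw [hts]
  | cons t ts =>
    unfold merge_sustained_flags_py_alt
    rw [hts]
    exact pvGrp_eq_foldB min_len gap ts [] t t

-- ===== VERDICT (by name: the statement is the Claim_ definition above) =====
theorem merge_sustained_flags_py_spec : Claim_equal_merge_sustained_flags_py := by
  intro flags min_len gap _
  unfold Spec_merge_sustained_flags_py
  rw [pvPortA_eq, pvPortB_eq]
  rw [(pvMain min_len gap flags 0 [] (-(10 : Int) ^ 9)).1]
  cases pvTrues 0 flags <;> simp
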